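-- pv_equiv track=rewrite | github.com/thehalleyyoung/halley-labs | causal-robustness-radii/proposals/proposal_00/implementation/causalcert/utils/math_utils.py | number_of_dags
-- ===== SOURCE A (Python) =====
-- import math
--
-- def number_of_dags(n: int) -> int:
--     """Exact count of labelled DAGs on *n* nodes (Robinson 1977 recurrence).
--
--     Warning: grows super-exponentially; feasible for n ≤ 18 or so.
--     """
--     if n <= 0:
--         return 1
--     a = [0] * (n + 1)
--     a[0] = 1
--     for i in range(1, n + 1):
--         total = 0
--         for k in range(1, i + 1):
--             sign = (-1) ** (k + 1)
--             binom = math.comb(i, k)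
--             total += sign * binom * (2 ** (k * (i - k))) * a[i - k]
--         a[i] = total
--     return a[n]
-- ===== SOURCE B (Python) =====
-- import math
-- from functools import lru_cache
--
--
-- @lru_cache(maxsize=None)
-- def _dags(i: int) -> int:
--     if i == 0:
--         return 1
--     return sum(
--         (-1) ** (k + 1) * math.comb(i, k) * 2 ** (k * (i - k)) * _dags(i - k)
--         for k in range(1, i + 1)
--     )
--
--
-- def number_of_dags(n: int) -> int:
--     """Exact count of labelled DAGs on *n* nodes (Robinson 1977 recurrence)."""
--     return 1 if n <= 0 else _dags(n)
-- ===== Notes on version B (the rewrite author's own statement) =====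
-- stated objective: alternative
-- what changed: Replaced the bottom-up array fill with a top-down memoized recursion (a lru_cache helper _dags); the non-positive base case stays outside the recursion and no array is allocated or indexed.
import Mathlib
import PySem

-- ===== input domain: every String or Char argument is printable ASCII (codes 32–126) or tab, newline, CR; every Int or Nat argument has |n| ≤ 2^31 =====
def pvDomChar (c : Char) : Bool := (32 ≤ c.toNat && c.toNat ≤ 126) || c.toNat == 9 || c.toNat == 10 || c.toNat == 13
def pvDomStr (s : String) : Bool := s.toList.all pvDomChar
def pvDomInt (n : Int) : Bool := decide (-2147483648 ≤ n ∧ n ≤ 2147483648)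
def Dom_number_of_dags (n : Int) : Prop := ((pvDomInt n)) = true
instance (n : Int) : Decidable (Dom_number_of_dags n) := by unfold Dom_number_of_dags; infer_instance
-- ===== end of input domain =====

-- B replaces A's bottom-up array fill by a top-down recursive helper (memoized in Python); same exact values.

-- ===== PORT A =====
-- inner loop: "for k in range(1, i+1): total += (-1)**(k+1)*math.comb(i,k)*2**(k*(i-k))*a[i-k]"
def dagsInner (a : List Int) (i : Int) : Int :=
  (PySem.List.pyRange 1 (i+1) 1).foldl
    (fun total k =>
      total + (-1:Int)^(k+1).toNat * ((i.toNat.choose k.toNat : Nat) : Int)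
        * (2:Int)^((k*(i-k)).toNat) * PySem.List.pyGetD a (i-k) 0) 0

-- body of "for i in range(1, n+1)": a[i] = total
def dagsStep (a : List Int) (i : Int) : List Int :=
  PySem.List.pySetD a i (dagsInner a i)

def number_of_dags (n : Int) : Int :=
  if n ≤ 0 then 1
  else
    PySem.List.pyGetD
      ((PySem.List.pyRange 1 (n+1) 1).foldl dagsStep
        ((List.replicate (n+1).toNat (0:Int)).set 0 1)) n 0

-- ===== PORT B =====
-- "_dags(i)" with @lru_cache: top-down recursion; the cache is modelled explicitly as a
-- dictionary threaded through the recursion (checked first, updated on return);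
-- "sum(... for k in range(1, i+1))" with k = j+1; attach is only the termination device
def dagsMemo : Nat → PySem.Dict Nat Int → PySem.Dict Nat Int × Int
  | 0, memo =>
    match PySem.Dict.get? memo 0 with
    | some v => (memo, v)
    | none => (PySem.Dict.insert memo 0 1, 1)
  | (m+1), memo =>
    match PySem.Dict.get? memo (m+1) with
    | some v => (memo, v)
    | none =>
      let p := (List.range (m+1)).attach.foldl
        (fun (acc : PySem.Dict Nat Int × Int) j =>
          let r := dagsMemo (m - j.1) acc.1
          (r.1, acc.2 + (-1:Int)^(j.1+2) * (((m+1).choose (j.1+1) : Nat) : Int)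
            * (2:Int)^((j.1+1)*(m-j.1)) * r.2))
        (memo, 0)
      (PySem.Dict.insert p.1 (m+1) p.2, p.2)
decreasing_by exact Nat.lt_succ_of_le (Nat.sub_le m j.1)

def number_of_dags_alt (n : Int) : Int :=
  if n ≤ 0 then 1 else (dagsMemo n.toNat PySem.Dict.empty).2

-- ===== PRECONDITION & SPEC =====
def Spec_number_of_dags (n : Int) (out : Int) : Prop := out = number_of_dags_alt n
instance (n : Int) (out : Int) : Decidable (Spec_number_of_dags n out) := by unfold Spec_number_of_dags; infer_instance

-- ===== CLAIM (what is proved, stated in full; the proofs are below) =====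
def Claim_equal_number_of_dags : Prop := ∀ (n : Int), Dom_number_of_dags n → Spec_number_of_dags n (number_of_dags n)

-- ===== LEMMAS AND PROOFS =====

-- specification value: the count of labelled DAGs on i nodes (proof-level only)
def dagsF : Nat → Int
  | 0 => 1
  | (i+1) =>
    ((List.range (i+1)).attach.map (fun j =>
      (-1:Int)^(j.1+2) * (((i+1).choose (j.1+1) : Nat) : Int)
        * (2:Int)^((j.1+1)*(i-j.1)) * dagsF (i-j.1))).sum
decreasing_by exact Nat.lt_succ_of_le (Nat.sub_le i j.1)

-- the memo dictionary only ever holds correct values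
def MemoOK (memo : PySem.Dict Nat Int) : Prop :=
  ∀ k v, PySem.Dict.get? memo k = some v → v = dagsF k

theorem memoOK_insert {memo : PySem.Dict Nat Int} (h : MemoOK memo) {i : Nat} {v : Int}
    (hv : v = dagsF i) : MemoOK (PySem.Dict.insert memo i v) := by
  intro k w hw
  by_cases hk : k = i
  · subst hk
    rw [PySem.Dict.get?_insert_self] at hw
    cases hw
    exact hv
  · rw [PySem.Dict.get?_insert_of_ne _ _ hk] at hw
    exact h k w hw

theorem fold_inv (m : Nat)
    (ih : ∀ j', j' < m+1 → ∀ memo, MemoOK memo →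
      (dagsMemo j' memo).2 = dagsF j' ∧ MemoOK (dagsMemo j' memo).1) :
    ∀ (l : List {x // x ∈ List.range (m+1)}) (memo : PySem.Dict Nat Int) (t : Int),
      MemoOK memo →
      (l.foldl (fun (acc : PySem.Dict Nat Int × Int) j =>
          let r := dagsMemo (m - j.1) acc.1
          (r.1, acc.2 + (-1:Int)^(j.1+2) * (((m+1).choose (j.1+1) : Nat) : Int)
            * (2:Int)^((j.1+1)*(m-j.1)) * r.2)) (memo, t)).2
        = t + (l.map (fun j => (-1:Int)^(j.1+2) * (((m+1).choose (j.1+1) : Nat) : Int)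
            * (2:Int)^((j.1+1)*(m-j.1)) * dagsF (m-j.1))).sum
      ∧ MemoOK (l.foldl (fun (acc : PySem.Dict Nat Int × Int) j =>
          let r := dagsMemo (m - j.1) acc.1
          (r.1, acc.2 + (-1:Int)^(j.1+2) * (((m+1).choose (j.1+1) : Nat) : Int)
            * (2:Int)^((j.1+1)*(m-j.1)) * r.2)) (memo, t)).1 := by
  intro l
  induction l with
  | nil => intro memo t h; exact ⟨by simp, h⟩
  | cons j l' ihl =>
    intro memo t h
    have hrec := ih (m - j.1) (Nat.lt_succ_of_le (Nat.sub_le m j.1)) memo h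
    rw [List.foldl_cons, List.map_cons, List.sum_cons]
    obtain ⟨h2, h1⟩ := ihl (dagsMemo (m - j.1) memo).1
      (t + (-1:Int)^(j.1+2) * (((m+1).choose (j.1+1) : Nat) : Int)
        * (2:Int)^((j.1+1)*(m-j.1)) * (dagsMemo (m - j.1) memo).2) hrec.2
    refine ⟨?_, ?_⟩
    · rw [h2, hrec.1]; ring
    · exact h1

theorem dagsMemo_spec : ∀ (i : Nat) (memo : PySem.Dict Nat Int), MemoOK memo →
    (dagsMemo i memo).2 = dagsF i ∧ MemoOK (dagsMemo i memo).1 := by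
  intro i
  induction i using Nat.strong_induction_on with
  | _ i ih =>
    intro memo hmemo
    match i with
    | 0 =>
      rw [dagsMemo]
      cases h : PySem.Dict.get? memo 0 with
      | some v => exact ⟨hmemo 0 v h, hmemo⟩
      | none => exact ⟨by simp [dagsF], memoOK_insert hmemo (by simp [dagsF])⟩
    | (m+1) =>
      rw [dagsMemo]
      cases h : PySem.Dict.get? memo (m+1) with
      | some v => exact ⟨hmemo (m+1) v h, hmemo⟩
      | none =>
        have ih' : ∀ j', j' < m+1 → ∀ memo, MemoOK memo →
            (dagsMemo j' memo).2 = dagsF j' ∧ MemoOK (dagsMemo j' memo).1 := by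
          intro j' hj'
          exact ih j' (by omega)
        obtain ⟨h2, h1⟩ := fold_inv m ih' (List.range (m+1)).attach memo 0 hmemo
        refine ⟨?_, ?_⟩
        · show (_ : _ × Int).2 = _
          rw [h2, zero_add, dagsF]
        · exact memoOK_insert h1 (by rw [h2, zero_add, dagsF])

theorem dagsF_succ (i : Nat) :
    dagsF (i+1) =
      ((List.range (i+1)).map (fun j =>
        (-1:Int)^(j+2) * (((i+1).choose (j+1) : Nat) : Int)
          * (2:Int)^((j+1)*(i-j)) * dagsF (i-j))).sum := by
  rw [dagsF]
  congr 1
  simp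

theorem foldl_add_f {α : Type} (l : List α) (f : α → Int) (t : Int) :
    l.foldl (fun t x => t + f x) t = t + (l.map f).sum := by
  induction l generalizing t with
  | nil => simp
  | cons x xs ih => simp [List.foldl_cons, ih, add_assoc]

theorem inner_eq (L : List Int) (m : Nat)
    (hv : ∀ j : Nat, j ≤ m → L.getD j 0 = dagsF j) :
    dagsInner L ((m:Int)+1) = dagsF (m+1) := by
  unfold dagsInner
  have hb : ((m:Int)+1+1-1).toNat = m+1 := by omega
  rw [PySem.List.pyRange_one, hb, List.foldl_map, foldl_add_f, dagsF_succ, zero_add]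
  congr 1
  apply List.map_congr_left
  intro j hj
  have hjm : j ≤ m := by
    have := List.mem_range.mp hj; omega
  have e1 : ((1:Int)+(j:Int)+1).toNat = j+2 := by omega
  have e2 : ((m:Int)+1).toNat = m+1 := by omega
  have e3 : ((1:Int)+(j:Int)).toNat = j+1 := by omega
  have e4 : (m:Int)+1-(1+(j:Int)) = ((m-j : Nat) : Int) := by omega
  have e5 : ((1+(j:Int)) * ((m-j : Nat) : Int)).toNat = (j+1)*(m-j) := by
    have : (1+(j:Int)) * ((m-j : Nat) : Int) = (((j+1)*(m-j) : Nat) : Int) := by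
      push_cast; ring
    rw [this, Int.toNat_natCast]
  rw [e1, e2, e3, e4, e5, PySem.List.pyGetD_natCast, hv (m-j) (by omega)]

theorem loop_inv (N : Nat) (m : Nat) (hm : m ≤ N) :
    ((PySem.List.pyRange 1 ((m:Int)+1) 1).foldl dagsStep
        ((List.replicate (N+1) (0:Int)).set 0 1)).length = N + 1 ∧
    ∀ j : Nat, j ≤ m →
      ((PySem.List.pyRange 1 ((m:Int)+1) 1).foldl dagsStep
        ((List.replicate (N+1) (0:Int)).set 0 1)).getD j 0 = dagsF j := by
  induction m with
  | zero =>
    rw [show ((0:Nat):Int)+1 = 1 by norm_num, PySem.List.pyRange_one_eq_nil (by norm_num)]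
    constructor
    · simp
    · intro j hj
      interval_cases j
      simp [dagsF]
  | succ m ih =>
    have hm' : m ≤ N := by omega
    obtain ⟨ihlen, ihv⟩ := ih hm'
    have hsplit : PySem.List.pyRange 1 ((m:Nat)+1+1 : Int) 1
        = PySem.List.pyRange 1 ((m:Int)+1) 1 ++ [(m:Int)+1] :=
      PySem.List.pyRange_one_succ_right (by omega)
    rw [show (((m+1:Nat)):Int)+1 = ((m:Nat):Int)+1+1 by push_cast; ring, hsplit,
      List.foldl_append]
    set L := (PySem.List.pyRange 1 ((m:Int)+1) 1).foldl dagsStep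
        ((List.replicate (N+1) (0:Int)).set 0 1) with hL
    have hval : dagsInner L ((m:Int)+1) = dagsF (m+1) :=
      inner_eq L m ihv
    have hset : dagsStep L ((m:Int)+1) = L.set (m+1) (dagsF (m+1)) := by
      unfold dagsStep
      rw [hval, show ((m:Int)+1) = (((m+1:Nat)):Int) by push_cast; ring,
        PySem.List.pySetD_natCast]
    rw [List.foldl_cons, List.foldl_nil, hset]
    constructor
    · simp [ihlen]
    · intro j hj
      by_cases hje : j = m+1
      · subst hje
        rw [List.getD, List.getElem?_set_self (by omega), Option.getD_some]
      · have hjm : j ≤ m := by omega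
        rw [List.getD, List.getElem?_set_ne (by omega), ← List.getD]
        exact ihv j hjm

-- ===== VERDICT (by name: the statement is the Claim_ definition above) =====
theorem number_of_dags_spec : Claim_equal_number_of_dags := by
  intro n _
  unfold Spec_number_of_dags number_of_dags number_of_dags_alt
  by_cases h : n ≤ 0
  · simp [h]
  · simp only [if_neg h]
    have hempty : MemoOK PySem.Dict.empty := by
      intro k v hv
      simp [PySem.Dict.empty, PySem.Dict.get?] at hv
    set N := n.toNat with hN
    have hn : n = (N:Int) := by omega
    have hN1 : 1 ≤ N := by omega
    have h1 : ((N:Int)+1).toNat = N+1 := by omega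
    obtain ⟨hlen, hv⟩ := loop_inv N N (le_refl N)
    rw [hn, h1]
    rw [PySem.List.pyGetD_natCast, hv N (le_refl N),
      (dagsMemo_spec N PySem.Dict.empty hempty).1]
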